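-- pv_equiv track=rewrite | github.com/swjungle4a-algorithm/algorithm_study | Jinho/level4/쿠키 구입.py | solution
-- ===== SOURCE A (Python) =====
-- def solution(cookie):
--     answer = 0
--     N = len(cookie)
--     for i in range(N):
--         set1 = set()
--         set2 = set()
--         tmp = 0
--         for j in range(i, -1, -1):
--             tmp += cookie[j]
--             set1.add(tmp)
--         tmp = 0
--         for k in range(i+1, N):
--             tmp += cookie[k]
--             set2.add(tmp)
--         set3 = set1 & set2
--         if set3:
--             answer = max(answer, max(set3))
--     return answer
-- ===== SOURCE B (Python) =====
-- def solution(cookie):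
--     # Prefix sums computed once; then sweep pairs (left boundary j, right
--     # boundary m) of the combined range, maintaining one rolling set of the
--     # prefix sums strictly between them: the pair splits into two equal-sum
--     # adjacent parts iff (P[j]+P[m])/2 is in that set.
--     N = len(cookie)
--     P = [0]
--     s = 0
--     for c in cookie:
--         s += c
--         P.append(s)
--     best = 0
--     for j in range(N - 1):
--         mid = set()
--         for m in range(j + 2, N + 1):
--             mid.add(P[m - 1])
--             s = P[j] + P[m]
--             if s % 2 == 0 and s // 2 in mid:
--                 best = max(best, (P[m] - P[j]) // 2)
--     return best
-- ===== Notes on version B (the rewrite author's own statement) =====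
-- stated objective: alternative
-- what changed: B iterates over pairs of outer boundaries (left start j, right end m) of the combined range with one rolling set of the prefix sums strictly between them, testing whether (P[j]+P[m])/2 lies in that set - instead of A's per-split rebuilding of two segment-sum sets, intersecting them and taking max() of the intersection.
import Mathlib
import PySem

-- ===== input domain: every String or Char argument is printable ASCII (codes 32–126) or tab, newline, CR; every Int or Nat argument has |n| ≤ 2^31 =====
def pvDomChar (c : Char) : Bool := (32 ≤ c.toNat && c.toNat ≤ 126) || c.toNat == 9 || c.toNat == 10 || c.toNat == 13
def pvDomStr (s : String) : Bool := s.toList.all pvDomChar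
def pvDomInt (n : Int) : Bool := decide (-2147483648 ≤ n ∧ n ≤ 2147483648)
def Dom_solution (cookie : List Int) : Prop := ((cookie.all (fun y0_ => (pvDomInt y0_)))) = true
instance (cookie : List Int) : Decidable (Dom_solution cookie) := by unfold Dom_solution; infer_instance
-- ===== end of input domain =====

-- B sweeps pairs of outer boundaries (left start j, right end m) with one rolling set of the
-- prefix sums strictly between them, testing whether (P[j]+P[m])/2 lies in that set — instead
-- of A's per-split rebuilding of two segment-sum sets, intersection and max() over the result.

-- ===== PORT A =====
-- all indices produced by the ranges are in bounds, so pyGetD is exact here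
def solution (cookie : List Int) : Int :=
  let N : Int := (cookie.length : Int)
  (PySem.List.pyRange 0 N 1).foldl (fun answer i =>
    let s1 : PySem.Set Int :=
      ((PySem.List.pyRange i (-1) (-1)).foldl
        (fun (p : Int × PySem.Set Int) j =>
          (p.1 + PySem.List.pyGetD cookie j 0,
           PySem.Set.add p.2 (p.1 + PySem.List.pyGetD cookie j 0)))
        (0, PySem.Set.empty)).2
    let s2 : PySem.Set Int :=
      ((PySem.List.pyRange (i + 1) N 1).foldl
        (fun (p : Int × PySem.Set Int) k =>
          (p.1 + PySem.List.pyGetD cookie k 0,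
           PySem.Set.add p.2 (p.1 + PySem.List.pyGetD cookie k 0)))
        (0, PySem.Set.empty)).2
    let s3 : PySem.Set Int := PySem.Set.inter s1 s2
    if s3 ≠ [] then max answer ((PySem.List.max? s3 (fun x => x)).getD 0) else answer) 0

-- ===== PORT B =====
-- all indices into P are in bounds (P has length len cookie + 1), so pyGetD is exact here
def solution_alt (cookie : List Int) : Int :=
  let N : Int := (cookie.length : Int)
  let P : List Int :=
    (cookie.foldl (fun (p : List Int × Int) c => (p.1 ++ [p.2 + c], p.2 + c)) ([0], 0)).1
  (PySem.List.pyRange 0 (N - 1) 1).foldl (fun best j =>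
    ((PySem.List.pyRange (j + 2) (N + 1) 1).foldl
      (fun (q : Int × PySem.Set Int) m =>
        let mid : PySem.Set Int := PySem.Set.add q.2 (PySem.List.pyGetD P (m - 1) 0)
        let s : Int := PySem.List.pyGetD P j 0 + PySem.List.pyGetD P m 0
        ((if PySem.Int.mod s 2 = 0 ∧ PySem.Set.contains mid (PySem.Int.floordiv s 2) = true
          then max q.1 (PySem.Int.floordiv (PySem.List.pyGetD P m 0 - PySem.List.pyGetD P j 0) 2)
          else q.1), mid))
      (best, PySem.Set.empty)).1) 0

-- ===== PRECONDITION & SPEC =====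
def Spec_solution (cookie : List Int) (out : Int) : Prop := out = solution_alt cookie
instance (cookie : List Int) (out : Int) : Decidable (Spec_solution cookie out) := by unfold Spec_solution; infer_instance

-- ===== CLAIM (what is proved, stated in full; the proofs are below) =====
def Claim_equal_solution : Prop := ∀ (cookie : List Int), Dom_solution cookie → Spec_solution cookie (solution cookie)

-- ===== LEMMAS AND PROOFS =====

-- prefix sum of the first n cookies
def Psum (cookie : List Int) (n : Nat) : Int := (cookie.take n).sum

-- the prefix-sum list B builds
def Plist (cookie : List Int) : List Int :=
  (List.range (cookie.length + 1)).map (fun n => Psum cookie n)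

-- A's loop body, named
def stepA (cookie : List Int) (answer i : Int) : Int :=
  let s1 : PySem.Set Int :=
    ((PySem.List.pyRange i (-1) (-1)).foldl
      (fun (p : Int × PySem.Set Int) j =>
        (p.1 + PySem.List.pyGetD cookie j 0,
         PySem.Set.add p.2 (p.1 + PySem.List.pyGetD cookie j 0)))
      (0, PySem.Set.empty)).2
  let s2 : PySem.Set Int :=
    ((PySem.List.pyRange (i + 1) (cookie.length : Int) 1).foldl
      (fun (p : Int × PySem.Set Int) k =>
        (p.1 + PySem.List.pyGetD cookie k 0,
         PySem.Set.add p.2 (p.1 + PySem.List.pyGetD cookie k 0)))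
      (0, PySem.Set.empty)).2
  let s3 : PySem.Set Int := PySem.Set.inter s1 s2
  if s3 ≠ [] then max answer ((PySem.List.max? s3 (fun x => x)).getD 0) else answer

-- the intersection A computes at split i, as a list
def s3fn (cookie : List Int) (i : Int) : PySem.Set Int :=
  PySem.Set.inter
    (((PySem.List.pyRange i (-1) (-1)).foldl
      (fun (p : Int × PySem.Set Int) j =>
        (p.1 + PySem.List.pyGetD cookie j 0,
         PySem.Set.add p.2 (p.1 + PySem.List.pyGetD cookie j 0)))
      (0, PySem.Set.empty)).2)
    (((PySem.List.pyRange (i + 1) (cookie.length : Int) 1).foldl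
      (fun (p : Int × PySem.Set Int) k =>
        (p.1 + PySem.List.pyGetD cookie k 0,
         PySem.Set.add p.2 (p.1 + PySem.List.pyGetD cookie k 0)))
      (0, PySem.Set.empty)).2)

-- B's inner loop body, named (P is the prefix-sum list, j the left boundary)
def stepIn (P : List Int) (j : Int) (q : Int × PySem.Set Int) (m : Int) : Int × PySem.Set Int :=
  let mid : PySem.Set Int := PySem.Set.add q.2 (PySem.List.pyGetD P (m - 1) 0)
  let s : Int := PySem.List.pyGetD P j 0 + PySem.List.pyGetD P m 0
  ((if PySem.Int.mod s 2 = 0 ∧ PySem.Set.contains mid (PySem.Int.floordiv s 2) = true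
    then max q.1 (PySem.Int.floordiv (PySem.List.pyGetD P m 0 - PySem.List.pyGetD P j 0) 2)
    else q.1), mid)

-- the list of candidate values B's inner loop meets, threading the rolling set
def candB (P : List Int) (j : Int) : List Int → PySem.Set Int → List Int
  | [], _ => []
  | m :: rest, mid0 =>
    let mid : PySem.Set Int := PySem.Set.add mid0 (PySem.List.pyGetD P (m - 1) 0)
    let s : Int := PySem.List.pyGetD P j 0 + PySem.List.pyGetD P m 0
    (if PySem.Int.mod s 2 = 0 ∧ PySem.Set.contains mid (PySem.Int.floordiv s 2) = true
     then [PySem.Int.floordiv (PySem.List.pyGetD P m 0 - PySem.List.pyGetD P j 0) 2]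
     else []) ++ candB P j rest mid

lemma sol_eq (cookie : List Int) :
    solution cookie = (PySem.List.pyRange 0 (cookie.length : Int) 1).foldl (stepA cookie) 0 := rfl

-- B's prefix-sum building fold, characterized
lemma foldP (l : List Int) : ∀ (acc : List Int) (s : Int),
    l.foldl (fun (p : List Int × Int) c => (p.1 ++ [p.2 + c], p.2 + c)) (acc, s)
      = (acc ++ (List.range l.length).map (fun n => s + (l.take (n + 1)).sum), s + l.sum) := by
  induction l with
  | nil => simp
  | cons c l ih =>
    intro acc s
    simp only [List.foldl_cons, ih, List.length_cons, List.range_succ_eq_map, List.map_cons,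
      List.map_map, List.take_succ_cons, List.sum_cons, List.take_zero, List.sum_nil]
    refine Prod.ext ?_ (by simp; ring)
    simp only [List.append_assoc, List.singleton_append]
    congr 1
    congr 1
    · ring
    · apply List.map_congr_left; intro n _; simp [Function.comp]; ring

lemma Plist_eq (cookie : List Int) :
    ((cookie.foldl (fun (p : List Int × Int) c => (p.1 ++ [p.2 + c], p.2 + c)) ([0], 0)).1)
      = Plist cookie := by
  rw [foldP]
  simp [Plist, Psum, List.range_succ_eq_map, List.map_map, Function.comp]

lemma alt_eq (cookie : List Int) :
    solution_alt cookie
      = (PySem.List.pyRange 0 ((cookie.length : Int) - 1) 1).foldl (fun best j =>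
          ((PySem.List.pyRange (j + 2) ((cookie.length : Int) + 1) 1).foldl
            (stepIn (Plist cookie) j) (best, PySem.Set.empty)).1) 0 := by
  simp only [solution_alt, Plist_eq]
  rfl

-- membership in the set accumulated by A's inner loops
lemma sumset_mem (g : Int → Int) (L : List Int) : ∀ (t0 : Int) (s0 : PySem.Set Int) (x : Int),
    (x ∈ (L.foldl (fun (p : Int × PySem.Set Int) j =>
        (p.1 + g j, PySem.Set.add p.2 (p.1 + g j))) (t0, s0)).2)
      ↔ x ∈ s0 ∨ ∃ n < L.length, x = t0 + ((L.map g).take (n + 1)).sum := by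
  induction L with
  | nil => simp
  | cons j L ih =>
    intro t0 s0 x
    rw [List.foldl_cons, ih, PySem.Set.mem_add]
    constructor
    · rintro ((hs | he) | ⟨n, hn, hx⟩)
      · exact Or.inl hs
      · exact Or.inr ⟨0, by simp, by simp [he]⟩
      · exact Or.inr ⟨n + 1, by simpa using hn, by simp [hx]; ring⟩
    · rintro (hs | ⟨n, hn, hx⟩)
      · exact Or.inl (Or.inl hs)
      · match n with
        | 0 => exact Or.inl (Or.inr (by simpa using hx))
        | n + 1 =>
          refine Or.inr ⟨n, by simpa using hn, ?_⟩
          simp at hx; rw [hx]; ring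

lemma map_getD_range_take (cookie : List Int) (m : Nat) (hm : m ≤ cookie.length) :
    (PySem.List.pyRange 0 (m : Int) 1).map (fun j => PySem.List.pyGetD cookie j 0)
      = cookie.take m := by
  rw [PySem.List.pyRange_one]
  simp only [sub_zero, Int.toNat_natCast, List.map_map]
  apply List.ext_getElem
  · simpa using hm
  · intro i h1 h2
    have hi : i < cookie.length := by simp at h2; omega
    simp [Function.comp, PySem.List.pyGetD_natCast, List.getD, List.getElem?_eq_getElem hi]

-- fold with a guarded max = fold of max over the filtered, mapped list
lemma foldl_max_le (L : List Int) (a y : Int) (ha : a ≤ y) (h : ∀ x ∈ L, x ≤ y) :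
    L.foldl max a ≤ y := by
  rcases PySem.List.foldl_max_mem L a with hm | hm
  · omega
  · exact h _ hm

lemma foldl_max_congr (L1 L2 : List Int) (a : Int) (h : ∀ x, x ∈ L1 ↔ x ∈ L2) :
    L1.foldl max a = L2.foldl max a := by
  apply le_antisymm
  · exact foldl_max_le _ _ _ (PySem.List.le_foldl_max L2 a).1
      (fun x hx => (PySem.List.le_foldl_max L2 a).2 x ((h x).mp hx))
  · exact foldl_max_le _ _ _ (PySem.List.le_foldl_max L1 a).1
      (fun x hx => (PySem.List.le_foldl_max L1 a).2 x ((h x).mpr hx))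

-- A's guarded "max(answer, max(s3))" is a fold of max over s3
lemma ite_max_eq_foldl (s3 : List Int) (a : Int) :
    (if s3 ≠ [] then max a ((PySem.List.max? s3 (fun x => x)).getD 0) else a)
      = s3.foldl max a := by
  match s3 with
  | [] => simp
  | x :: xs =>
    simp only [ne_eq, reduceCtorEq, not_false_eq_true, if_true]
    have hne : PySem.List.max? (x :: xs) (fun y => y) ≠ none := by
      rw [ne_eq, PySem.List.max?_eq_none_iff]; simp
    obtain ⟨m, hm⟩ := Option.ne_none_iff_exists'.mp hne
    rw [hm]
    have hmem := PySem.List.max?_mem hm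
    have hmax := PySem.List.max?_isMax hm
    apply le_antisymm
    · simp only [Option.getD_some, max_le_iff]
      exact ⟨(PySem.List.le_foldl_max _ a).1, (PySem.List.le_foldl_max _ a).2 m hmem⟩
    · exact foldl_max_le _ _ _ (le_max_left _ _)
        (fun z hz => le_trans (hmax z hz) (le_max_right _ _))

lemma stepA_eq_foldl (cookie : List Int) (ans i : Int) :
    stepA cookie ans i = (s3fn cookie i).foldl max ans :=
  ite_max_eq_foldl _ _

-- a fold of per-index maxima is a fold of max over the concatenation
lemma foldl_foldl_max (f : Int → List Int) (L : List Int) : ∀ (a : Int),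
    L.foldl (fun acc i => (f i).foldl max acc) a = (L.flatMap f).foldl max a := by
  induction L with
  | nil => intro a; rfl
  | cons i L ih => intro a; rw [List.foldl_cons, List.flatMap_cons, List.foldl_append, ih]

-- B's inner fold returns the running max over the candidate list
lemma innerB_eq (P : List Int) (j : Int) : ∀ (L : List Int) (best : Int) (mid : PySem.Set Int),
    (L.foldl (stepIn P j) (best, mid)).1 = (candB P j L mid).foldl max best := by
  intro L
  induction L with
  | nil => intro best mid; rfl
  | cons m rest ih =>
    intro best mid
    rw [List.foldl_cons]
    show (rest.foldl (stepIn P j) (stepIn P j (best, mid) m)).1 = _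
    simp only [stepIn, candB]
    split_ifs with h
    · rw [ih]; simp
    · rw [ih]; simp

-- reading the prefix-sum list
lemma pget_Plist (cookie : List Int) (m : Nat) (hm : m ≤ cookie.length) :
    PySem.List.pyGetD (Plist cookie) (m : Int) 0 = Psum cookie m := by
  rw [Plist, PySem.List.pyGetD_natCast, PySem.List.getD_map_range _ _ _ _ (by omega)]

lemma sum_take_drop (cookie : List Int) (k m : Nat) :
    ((cookie.drop k).take m).sum = (cookie.take (k + m)).sum - (cookie.take k).sum := by
  rw [List.take_add, List.sum_append]; ring

lemma sum_drop_take (cookie : List Int) (k m : Nat) (hk : k ≤ m) :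
    ((cookie.take m).drop k).sum = (cookie.take m).sum - (cookie.take k).sum := by
  have h := List.sum_take_add_sum_drop (cookie.take m) k
  rw [List.take_take, min_eq_left hk] at h
  omega

lemma mem_s1 (cookie : List Int) (a : Nat) (h : a + 1 ≤ cookie.length) (x : Int) :
    (x ∈ ((PySem.List.pyRange (a : Int) (-1) (-1)).foldl
      (fun (p : Int × PySem.Set Int) j =>
        (p.1 + PySem.List.pyGetD cookie j 0,
         PySem.Set.add p.2 (p.1 + PySem.List.pyGetD cookie j 0)))
      (0, PySem.Set.empty)).2)
    ↔ ∃ j ≤ a, x = Psum cookie (a + 1) - Psum cookie j := by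
  rw [sumset_mem (fun j => PySem.List.pyGetD cookie j 0)]
  have hrev : PySem.List.pyRange (a : Int) (-1) (-1)
      = (PySem.List.pyRange 0 ((a : Int) + 1) 1).reverse := by
    have := PySem.List.pyRange_neg_one_eq_reverse (a := (a : Int)) (b := -1)
    simpa using this
  have hmap : (PySem.List.pyRange (a : Int) (-1) (-1)).map (fun j => PySem.List.pyGetD cookie j 0)
      = (cookie.take (a + 1)).reverse := by
    rw [hrev, List.map_reverse]
    rw [show ((a : Int) + 1) = ((a + 1 : Nat) : Int) by push_cast; ring]
    rw [map_getD_range_take cookie (a + 1) h]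
  have hlen : (PySem.List.pyRange (a : Int) (-1) (-1)).length = a + 1 := by
    rw [hrev, List.length_reverse, PySem.List.length_pyRange_one]
    omega
  rw [hmap, hlen]
  simp only [PySem.Set.empty, List.not_mem_nil, false_or]
  constructor
  · rintro ⟨n, hn, hx⟩
    refine ⟨a - n, by omega, ?_⟩
    rw [List.take_reverse, List.sum_reverse] at hx
    rw [List.length_take, min_eq_left h] at hx
    rw [sum_drop_take cookie (a + 1 - (n + 1)) (a + 1) (by omega)] at hx
    rw [hx]; simp only [Psum]
    rw [show a + 1 - (n + 1) = a - n by omega]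
    ring
  · rintro ⟨j, hj, hx⟩
    refine ⟨a - j, by omega, ?_⟩
    rw [List.take_reverse, List.sum_reverse]
    rw [List.length_take, min_eq_left h]
    rw [sum_drop_take cookie (a + 1 - (a - j + 1)) (a + 1) (by omega)]
    rw [hx]; simp only [Psum]
    rw [show a + 1 - (a - j + 1) = j by omega]
    ring

lemma mem_s2 (cookie : List Int) (a : Nat) (h : a + 1 ≤ cookie.length) (x : Int) :
    (x ∈ ((PySem.List.pyRange (((a + 1 : Nat)) : Int) (cookie.length : Int) 1).foldl
      (fun (p : Int × PySem.Set Int) k =>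
        (p.1 + PySem.List.pyGetD cookie k 0,
         PySem.Set.add p.2 (p.1 + PySem.List.pyGetD cookie k 0)))
      (0, PySem.Set.empty)).2)
    ↔ ∃ m, a + 2 ≤ m ∧ m ≤ cookie.length ∧ x = Psum cookie m - Psum cookie (a + 1) := by
  rw [sumset_mem (fun j => PySem.List.pyGetD cookie j 0)]
  have hmap : (PySem.List.pyRange (((a + 1 : Nat)) : Int) (cookie.length : Int) 1).map
        (fun j => PySem.List.pyGetD cookie j 0) = cookie.drop (a + 1) := by
    have := PySem.List.map_pyGetD_pyRange' (xs := cookie) (a := ((a + 1 : Nat) : Int)) (d := 0) (by omega)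
    simpa using this
  have hlen : (PySem.List.pyRange (((a + 1 : Nat)) : Int) (cookie.length : Int) 1).length
      = cookie.length - (a + 1) := by
    rw [PySem.List.length_pyRange_one]; omega
  rw [hmap, hlen]
  simp only [PySem.Set.empty, List.not_mem_nil, false_or]
  constructor
  · rintro ⟨n, hn, hx⟩
    refine ⟨a + 1 + (n + 1), by omega, by omega, ?_⟩
    rw [sum_take_drop] at hx
    rw [hx]; simp only [Psum]
    ring
  · rintro ⟨m, hm1, hm2, hx⟩
    refine ⟨m - (a + 2), by omega, ?_⟩
    rw [sum_take_drop]
    rw [hx]; simp only [Psum]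
    rw [show a + 1 + (m - (a + 2) + 1) = m by omega]
    ring

lemma mem_s3fn (cookie : List Int) (a : Nat) (h : a + 1 ≤ cookie.length) (x : Int) :
    x ∈ s3fn cookie (a : Int)
      ↔ (∃ j ≤ a, x = Psum cookie (a + 1) - Psum cookie j)
        ∧ (∃ m, a + 2 ≤ m ∧ m ≤ cookie.length ∧ x = Psum cookie m - Psum cookie (a + 1)) := by
  simp only [s3fn]
  rw [PySem.Set.mem_inter, mem_s1 cookie a h]
  rw [show ((a : Int) + 1) = ((a + 1 : Nat) : Int) by push_cast; ring]
  rw [mem_s2 cookie a h]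

-- membership in the flattened list of A's intersections
lemma mem_Aflat (cookie : List Int) (x : Int) :
    (x ∈ (PySem.List.pyRange 0 (cookie.length : Int) 1).flatMap (s3fn cookie))
      ↔ ∃ a : Nat, a + 1 ≤ cookie.length
          ∧ (∃ j ≤ a, x = Psum cookie (a + 1) - Psum cookie j)
          ∧ (∃ m, a + 2 ≤ m ∧ m ≤ cookie.length ∧ x = Psum cookie m - Psum cookie (a + 1)) := by
  rw [List.mem_flatMap]
  constructor
  · rintro ⟨i, hi, hx⟩
    obtain ⟨hi0, hi1⟩ := PySem.List.mem_pyRange_one.mp hi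
    have hcast : i = ((i.toNat : Nat) : Int) := (Int.toNat_of_nonneg hi0).symm
    rw [hcast] at hx
    refine ⟨i.toNat, by omega, (mem_s3fn cookie i.toNat (by omega) x).mp hx⟩
  · rintro ⟨a, ha, h1⟩
    exact ⟨(a : Int), PySem.List.mem_pyRange_one.mpr ⟨by omega, by omega⟩,
      (mem_s3fn cookie a ha x).mpr h1⟩

-- floor-division-by-two facts
lemma fdiv_two_mul (k : Int) : PySem.Int.floordiv (2 * k) 2 = k := by
  rw [PySem.Int.floordiv_eq_ediv_of_pos (by norm_num)]
  exact Int.mul_ediv_cancel_left k (by norm_num)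

lemma eq_two_mul_fdiv (s : Int) (h : PySem.Int.mod s 2 = 0) :
    s = 2 * PySem.Int.floordiv s 2 := by
  have hh := PySem.Int.floordiv_mul_add_mod s 2
  omega

-- membership in B's candidate list over a tail of the inner range
lemma mem_candB (P : List Int) (j b x : Int) : ∀ (k : Nat) (a : Int), a + k = b → j + 2 ≤ a →
    ∀ (mid : PySem.Set Int),
    (∀ y, y ∈ mid ↔ ∃ t : Int, j < t ∧ t ≤ a - 2 ∧ PySem.List.pyGetD P t 0 = y) →
    (x ∈ candB P j (PySem.List.pyRange a b 1) mid
      ↔ ∃ m : Int, a ≤ m ∧ m < b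
          ∧ PySem.Int.mod (PySem.List.pyGetD P j 0 + PySem.List.pyGetD P m 0) 2 = 0
          ∧ (∃ t : Int, j < t ∧ t < m ∧ PySem.List.pyGetD P t 0
              = PySem.Int.floordiv (PySem.List.pyGetD P j 0 + PySem.List.pyGetD P m 0) 2)
          ∧ x = PySem.Int.floordiv (PySem.List.pyGetD P m 0 - PySem.List.pyGetD P j 0) 2) := by
  intro k
  induction k with
  | zero =>
    intro a hab _ mid _
    rw [show a = b by omega] at *
    rw [PySem.List.pyRange_one_eq_nil (le_refl b)]
    simp only [candB, List.not_mem_nil, false_iff]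
    rintro ⟨m, hm1, hm2, _⟩; omega
  | succ k ih =>
    intro a hab hja mid hmid
    rw [PySem.List.pyRange_one_cons (by omega)]
    simp only [candB]
    have hmid' : ∀ y, y ∈ PySem.Set.add mid (PySem.List.pyGetD P (a - 1) 0)
        ↔ ∃ t : Int, j < t ∧ t ≤ (a + 1) - 2 ∧ PySem.List.pyGetD P t 0 = y := by
      intro y
      rw [PySem.Set.mem_add, hmid y]
      constructor
      · rintro (⟨t, h1, h2, h3⟩ | hy)
        · exact ⟨t, h1, by omega, h3⟩
        · exact ⟨a - 1, by omega, by omega, hy.symm⟩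
      · rintro ⟨t, h1, h2, h3⟩
        by_cases ht : t ≤ a - 2
        · exact Or.inl ⟨t, h1, ht, h3⟩
        · right; rw [show a - 1 = t by omega]; exact h3.symm
    rw [List.mem_append, ih (a + 1) (by omega) (by omega) _ hmid']
    constructor
    · rintro (hx | ⟨m, hm⟩)
      · rw [List.mem_ite_nil_right] at hx
        obtain ⟨⟨hmod, hcont⟩, hx⟩ := hx
        rw [PySem.Set.contains_iff] at hcont
        obtain ⟨t, ht1, ht2, ht3⟩ := (hmid' _).mp hcont
        refine ⟨a, le_refl a, by omega, hmod, ⟨t, ht1, by omega, ht3⟩, by simpa using hx⟩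
      · exact ⟨m, by omega, by omega, hm.2.2⟩
    · rintro ⟨m, hm1, hm2, hmod, ⟨t, ht1, ht2, ht3⟩, hx⟩
      by_cases hma : m = a
      · subst hma
        left
        rw [List.mem_ite_nil_right]
        refine ⟨⟨hmod, ?_⟩, by simpa using hx⟩
        rw [PySem.Set.contains_iff]
        exact (hmid' _).mpr ⟨t, ht1, by omega, ht3⟩
      · exact Or.inr ⟨m, by omega, hm2, hmod, ⟨t, ht1, ht2, ht3⟩, hx⟩

-- membership in the flattened list of B's candidates
lemma mem_Bflat (cookie : List Int) (x : Int) :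
    (x ∈ (PySem.List.pyRange 0 ((cookie.length : Int) - 1) 1).flatMap (fun j =>
        candB (Plist cookie) j
          (PySem.List.pyRange (j + 2) ((cookie.length : Int) + 1) 1) PySem.Set.empty))
      ↔ ∃ j : Int, 0 ≤ j ∧ j < (cookie.length : Int) - 1
          ∧ ∃ m : Int, j + 2 ≤ m ∧ m < (cookie.length : Int) + 1
          ∧ PySem.Int.mod (PySem.List.pyGetD (Plist cookie) j 0 + PySem.List.pyGetD (Plist cookie) m 0) 2 = 0
          ∧ (∃ t : Int, j < t ∧ t < m ∧ PySem.List.pyGetD (Plist cookie) t 0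
              = PySem.Int.floordiv (PySem.List.pyGetD (Plist cookie) j 0 + PySem.List.pyGetD (Plist cookie) m 0) 2)
          ∧ x = PySem.Int.floordiv (PySem.List.pyGetD (Plist cookie) m 0 - PySem.List.pyGetD (Plist cookie) j 0) 2 := by
  rw [List.mem_flatMap]
  constructor
  · rintro ⟨j, hj, hx⟩
    obtain ⟨hj0, hj1⟩ := PySem.List.mem_pyRange_one.mp hj
    rw [mem_candB (Plist cookie) j ((cookie.length : Int) + 1) x
      ((cookie.length : Int) + 1 - (j + 2)).toNat (j + 2) (by omega) (le_refl _)
      PySem.Set.empty (by intro y; simp [PySem.Set.empty]; omega)] at hx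
    obtain ⟨m, hm⟩ := hx
    exact ⟨j, hj0, hj1, m, hm⟩
  · rintro ⟨j, hj0, hj1, m, hm⟩
    refine ⟨j, PySem.List.mem_pyRange_one.mpr ⟨hj0, hj1⟩, ?_⟩
    rw [mem_candB (Plist cookie) j ((cookie.length : Int) + 1) x
      ((cookie.length : Int) + 1 - (j + 2)).toNat (j + 2) (by omega) (le_refl _)
      PySem.Set.empty (by intro y; simp [PySem.Set.empty]; omega)]
    exact ⟨m, hm⟩

-- the central bridge: A's candidate values are exactly B's candidate values
lemma flat_mem_iff (cookie : List Int) (x : Int) :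
    (x ∈ (PySem.List.pyRange 0 (cookie.length : Int) 1).flatMap (s3fn cookie))
      ↔ (x ∈ (PySem.List.pyRange 0 ((cookie.length : Int) - 1) 1).flatMap (fun j =>
          candB (Plist cookie) j
            (PySem.List.pyRange (j + 2) ((cookie.length : Int) + 1) 1) PySem.Set.empty)) := by
  rw [mem_Aflat, mem_Bflat]
  constructor
  · rintro ⟨a, ha, ⟨j, hj, hxj⟩, ⟨m, hm1, hm2, hxm⟩⟩
    have hPj := pget_Plist cookie j (by omega)
    have hPm := pget_Plist cookie m (by omega)
    have hPt := pget_Plist cookie (a + 1) (by omega)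
    have hsum : Psum cookie j + Psum cookie m = 2 * Psum cookie (a + 1) := by omega
    refine ⟨(j : Int), by omega, by omega, (m : Int), by omega, by omega, ?_, ?_, ?_⟩
    · rw [hPj, hPm, hsum, PySem.Int.mod_eq_zero_iff_dvd]
      exact ⟨Psum cookie (a + 1), rfl⟩
    · refine ⟨((a + 1 : Nat) : Int), by omega, by omega, ?_⟩
      rw [hPt, hPj, hPm, hsum, fdiv_two_mul]
    · rw [hPj, hPm, show Psum cookie m - Psum cookie j = 2 * x by omega, fdiv_two_mul]
  · rintro ⟨j, hj0, hj1, m, hm1, hm2, hmod, ⟨t, ht1, ht2, ht3⟩, hx⟩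
    have hjc : j = ((j.toNat : Nat) : Int) := (Int.toNat_of_nonneg hj0).symm
    have hmc : m = ((m.toNat : Nat) : Int) := (Int.toNat_of_nonneg (by omega)).symm
    have htc : t = ((t.toNat : Nat) : Int) := (Int.toNat_of_nonneg (by omega)).symm
    have hPj := pget_Plist cookie j.toNat (by omega)
    have hPm := pget_Plist cookie m.toNat (by omega)
    have hPt := pget_Plist cookie t.toNat (by omega)
    rw [hjc, hmc] at hmod hx
    rw [hjc, hmc, htc] at ht3
    rw [hPj, hPm] at hmod hx
    rw [hPj, hPm, hPt] at ht3
    have hs := eq_two_mul_fdiv _ hmod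
    rw [← ht3] at hs
    have hxv : x = Psum cookie t.toNat - Psum cookie j.toNat := by
      rw [hx, show Psum cookie m.toNat - Psum cookie j.toNat
        = 2 * (Psum cookie t.toNat - Psum cookie j.toNat) by omega, fdiv_two_mul]
    refine ⟨t.toNat - 1, by omega, ⟨j.toNat, by omega, ?_⟩, ⟨m.toNat, by omega, by omega, ?_⟩⟩
    · rw [show t.toNat - 1 + 1 = t.toNat by omega]; exact hxv
    · rw [show t.toNat - 1 + 1 = t.toNat by omega]; omega

-- ===== VERDICT (by name: the statement is the Claim_ definition above) =====
theorem solution_spec : Claim_equal_solution := by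
  intro cookie _
  unfold Spec_solution
  rw [sol_eq, alt_eq]
  have hA : (PySem.List.pyRange 0 (cookie.length : Int) 1).foldl (stepA cookie) 0
      = ((PySem.List.pyRange 0 (cookie.length : Int) 1).flatMap (s3fn cookie)).foldl max 0 := by
    rw [← foldl_foldl_max]
    apply PySem.List.foldl_congr_mem
    intro acc i _
    exact stepA_eq_foldl cookie acc i
  have hB : (PySem.List.pyRange 0 ((cookie.length : Int) - 1) 1).foldl (fun best j =>
        ((PySem.List.pyRange (j + 2) ((cookie.length : Int) + 1) 1).foldl
          (stepIn (Plist cookie) j) (best, PySem.Set.empty)).1) 0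
      = ((PySem.List.pyRange 0 ((cookie.length : Int) - 1) 1).flatMap (fun j =>
          candB (Plist cookie) j
            (PySem.List.pyRange (j + 2) ((cookie.length : Int) + 1) 1) PySem.Set.empty)).foldl max 0 := by
    rw [← foldl_foldl_max]
    apply PySem.List.foldl_congr_mem
    intro acc j _
    exact innerB_eq (Plist cookie) j _ acc _
  rw [hA, hB]
  exact foldl_max_congr _ _ 0 (flat_mem_iff cookie)
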